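-- pv_equiv track=rewrite | github.com/crptomonkeys/greenwiz | greenwiz/wax_chain/wax_util.py | prioritize_endpoints
-- ===== SOURCE A (Python) =====
-- def prioritize_endpoints(endpoints: list[str], preferred_endpoints: list[str]) -> list[str]:
--     """Reorders endpoints so preferred entries appear first while preserving relative order otherwise."""
--     preferred_order = {
--         entry.rstrip("/"): index for index, entry in enumerate(preferred_endpoints)
--     }
--     unique_endpoints: list[str] = []
--     seen: set[str] = set()
--     for endpoint in endpoints:
--         normalized = endpoint.rstrip("/")
--         if normalized in seen:
--             continue
--         seen.add(normalized)
--         unique_endpoints.append(endpoint)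
--     prioritized = sorted(
--         [entry for entry in unique_endpoints if entry.rstrip("/") in preferred_order],
--         key=lambda entry: preferred_order[entry.rstrip("/")],
--     )
--     remaining = [entry for entry in unique_endpoints if entry.rstrip("/") not in preferred_order]
--     return prioritized + remaining
-- ===== SOURCE B (Python) =====
-- def prioritize_endpoints(endpoints: list[str], preferred_endpoints: list[str]) -> list[str]:
--     """Single dedup pass scattering preferred entries into fixed slots; no sort."""
--     order = {}
--     for index, entry in enumerate(preferred_endpoints):
--         order[entry.rstrip("/")] = index
--     slots = [None] * len(preferred_endpoints)
--     remaining = []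
--     seen = set()
--     for endpoint in endpoints:
--         normalized = endpoint.rstrip("/")
--         if normalized in seen:
--             continue
--         seen.add(normalized)
--         if normalized in order:
--             slots[order[normalized]] = endpoint
--         else:
--             remaining.append(endpoint)
--     return [slot for slot in slots if slot is not None] + remaining
-- ===== Notes on version B (the rewrite author's own statement) =====
-- stated objective: alternative
-- what changed: Replaces A's two comprehension passes over unique_endpoints plus sorted(...) with a single dedup pass that scatters each preferred endpoint directly into a slot array indexed by its preference position (indices are distinct after dedup) and then compacts the slots; no sort is performed.
import Mathlib
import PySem

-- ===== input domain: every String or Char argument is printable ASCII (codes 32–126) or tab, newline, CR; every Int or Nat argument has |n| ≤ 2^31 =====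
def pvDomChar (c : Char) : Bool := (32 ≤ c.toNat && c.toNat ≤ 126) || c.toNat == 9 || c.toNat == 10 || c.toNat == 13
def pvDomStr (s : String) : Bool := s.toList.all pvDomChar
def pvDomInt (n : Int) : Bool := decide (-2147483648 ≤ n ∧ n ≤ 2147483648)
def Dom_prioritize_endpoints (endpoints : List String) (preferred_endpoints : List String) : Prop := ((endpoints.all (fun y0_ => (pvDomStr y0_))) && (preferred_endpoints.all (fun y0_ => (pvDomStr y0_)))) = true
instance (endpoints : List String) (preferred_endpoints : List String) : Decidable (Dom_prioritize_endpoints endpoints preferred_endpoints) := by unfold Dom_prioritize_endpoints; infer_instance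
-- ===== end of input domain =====

-- B replaces A's sort of the preferred entries by scattering them into a fixed
-- slot array during a single dedup pass (objective: alternative, no sort pass).

-- s.rstrip("/"), ported by hand (PySem has no rstrip-with-chars); exact: drops
-- exactly the maximal trailing run of '/' characters.
def pvNorm (s : String) : String :=
  String.ofList ((s.toList.reverse.dropWhile (fun c => c == '/')).reverse)

-- ===== PORT A =====
def prioritize_endpoints (endpoints : List String) (preferred_endpoints : List String) : List String :=
  let preferred_order : PySem.Dict String Int :=
    (PySem.List.enumerate preferred_endpoints).foldl
      (fun d p => d.insert (pvNorm p.2) p.1) (PySem.Dict.mk [])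
  let st := endpoints.foldl
    (fun (st : List String × PySem.Set String) endpoint =>
      let normalized := pvNorm endpoint
      if PySem.Set.contains st.2 normalized then st
      else (st.1 ++ [endpoint], PySem.Set.add st.2 normalized))
    ([], PySem.Set.empty)
  let unique_endpoints := st.1
  let prioritized := PySem.List.sorted
    (unique_endpoints.filter (fun entry => preferred_order.contains (pvNorm entry)))
    (fun entry => preferred_order.getD (pvNorm entry) 0)
  let remaining := unique_endpoints.filter (fun entry => ! preferred_order.contains (pvNorm entry))
  prioritized ++ remaining

-- ===== PORT B =====
def prioritize_endpoints_alt (endpoints : List String) (preferred_endpoints : List String) : List String :=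
  let order : PySem.Dict String Int :=
    (PySem.List.enumerate preferred_endpoints).foldl
      (fun d p => d.insert (pvNorm p.2) p.1) (PySem.Dict.mk [])
  let st := endpoints.foldl
    (fun (st : List (Option String) × List String × PySem.Set String) endpoint =>
      let normalized := pvNorm endpoint
      if PySem.Set.contains st.2.2 normalized then st
      else
        let seen := PySem.Set.add st.2.2 normalized
        if order.contains normalized then
          -- slots[order[normalized]] = endpoint : the index is a valid
          -- nonnegative list index (an enumerate index), so .set/.toNat is exact
          (st.1.set (order.getD normalized 0).toNat (some endpoint), st.2.1, seen)
        else (st.1, st.2.1 ++ [endpoint], seen))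
    (List.replicate preferred_endpoints.length none, [], PySem.Set.empty)
  (st.1.filterMap id) ++ st.2.1

-- ===== PRECONDITION & SPEC =====
def Spec_prioritize_endpoints (endpoints : List String) (preferred_endpoints : List String) (out : List String) : Prop := out = prioritize_endpoints_alt endpoints preferred_endpoints
instance (endpoints : List String) (preferred_endpoints : List String) (out : List String) : Decidable (Spec_prioritize_endpoints endpoints preferred_endpoints out) := by unfold Spec_prioritize_endpoints; infer_instance

-- ===== CLAIM (what is proved, stated in full; the proofs are below) =====
def Claim_equal_prioritize_endpoints : Prop := ∀ (endpoints : List String) (preferred_endpoints : List String), Dom_prioritize_endpoints endpoints preferred_endpoints → Spec_prioritize_endpoints endpoints preferred_endpoints (prioritize_endpoints endpoints preferred_endpoints)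

-- ===== LEMMAS AND PROOFS =====

lemma pvEnum_mem (l : List String) (s i : Int) (x : String)
    (h : (i, x) ∈ PySem.List.enumerate l s) : ∃ k : Nat, i = s + k ∧ l[k]? = some x := by
  induction l generalizing s with
  | nil => simp [PySem.List.enumerate] at h
  | cons a t ih =>
    rw [show PySem.List.enumerate (a :: t) s = (s, a) :: PySem.List.enumerate t (s+1) from rfl] at h
    rcases List.mem_cons.mp h with h | h
    · obtain ⟨h1, h2⟩ := Prod.mk.injEq .. ▸ h
      exact ⟨0, by omega, by simp [h2]⟩
    · obtain ⟨k, hk, hx⟩ := ih (s+1) h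
      exact ⟨k+1, by push_cast; omega, by simpa using hx⟩

lemma pvDict_source (l : List (Int × String)) (d : PySem.Dict String Int) (k : String) (v : Int)
    (h : (l.foldl (fun d p => d.insert (pvNorm p.2) p.1) d).get? k = some v) :
    d.get? k = some v ∨ ∃ p ∈ l, pvNorm p.2 = k ∧ p.1 = v := by
  induction l generalizing d with
  | nil => exact .inl h
  | cons a t ih =>
    simp only [List.foldl_cons] at h
    rcases ih _ h with h' | ⟨p, hp, hn, hv⟩
    · rw [PySem.Dict.get?_insert] at h'
      split at h'
      · exact .inr ⟨a, List.mem_cons_self .., by simp_all⟩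
      · exact .inl h'
    · exact .inr ⟨p, List.mem_cons_of_mem _ hp, hn, hv⟩

def pvDictOK (D : PySem.Dict String Int) (n : Nat) : Prop :=
  (∀ k v, D.get? k = some v → 0 ≤ v ∧ v.toNat < n) ∧
  (∀ k k' v, D.get? k = some v → D.get? k' = some v → k = k')

lemma pvDict_ok (pref : List String) :
    pvDictOK ((PySem.List.enumerate pref).foldl
      (fun d p => d.insert (pvNorm p.2) p.1) (PySem.Dict.mk [])) pref.length := by
  constructor
  · intro k v h
    rcases pvDict_source _ _ _ _ h with h' | ⟨p, hp, _, hv⟩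
    · simp [PySem.Dict.get?] at h'
    · obtain ⟨j, hj, hx⟩ := pvEnum_mem pref 0 p.1 p.2 (by simpa using hp)
      obtain ⟨hlt, -⟩ := List.getElem?_eq_some_iff.mp hx
      omega
  · intro k k' v h h'
    rcases pvDict_source _ _ _ _ h with h1 | ⟨p, hp, hn, hv⟩
    · simp [PySem.Dict.get?] at h1
    rcases pvDict_source _ _ _ _ h' with h1 | ⟨q, hq, hn', hv'⟩
    · simp [PySem.Dict.get?] at h1
    obtain ⟨j, hj, hx⟩ := pvEnum_mem pref 0 p.1 p.2 (by simpa using hp)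
    obtain ⟨j', hj', hx'⟩ := pvEnum_mem pref 0 q.1 q.2 (by simpa using hq)
    have : j = j' := by omega
    subst this
    rw [hx] at hx'
    simp only [Option.some.injEq] at hx'
    rw [← hn, ← hn', hx']

def pvAStep (st : List String × PySem.Set String) (e : String) : List String × PySem.Set String :=
  let normalized := pvNorm e
  if PySem.Set.contains st.2 normalized then st
  else (st.1 ++ [e], PySem.Set.add st.2 normalized)

def pvIdx (D : PySem.Dict String Int) (e : String) : Int := D.getD (pvNorm e) 0

def pvBStep (D : PySem.Dict String Int)
    (st : List (Option String) × List String × PySem.Set String) (e : String) :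
    List (Option String) × List String × PySem.Set String :=
  let normalized := pvNorm e
  if PySem.Set.contains st.2.2 normalized then st
  else
    let seen := PySem.Set.add st.2.2 normalized
    if D.contains normalized then
      (st.1.set (D.getD normalized 0).toNat (some e), st.2.1, seen)
    else (st.1, st.2.1 ++ [e], seen)

def pvScatter (D : PySem.Dict String Int) (sl : List (Option String)) (P : List String) :
    List (Option String) :=
  P.foldl (fun sl e => sl.set (pvIdx D e).toNat (some e)) sl

lemma pvAStep_pos (u : List String) (s : PySem.Set String) (e : String)
    (h : PySem.Set.contains s (pvNorm e) = true) : pvAStep (u, s) e = (u, s) := by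
  simp only [pvAStep]; rw [if_pos h]

lemma pvAStep_neg (u : List String) (s : PySem.Set String) (e : String)
    (h : ¬ PySem.Set.contains s (pvNorm e) = true) :
    pvAStep (u, s) e = (u ++ [e], PySem.Set.add s (pvNorm e)) := by
  simp only [pvAStep]; rw [if_neg h]

lemma pvBStep_pos (D : PySem.Dict String Int) (sl : List (Option String)) (r : List String)
    (s : PySem.Set String) (e : String) (h : PySem.Set.contains s (pvNorm e) = true) :
    pvBStep D (sl, r, s) e = (sl, r, s) := by
  simp only [pvBStep]; rw [if_pos h]

lemma pvBStep_neg_in (D : PySem.Dict String Int) (sl : List (Option String)) (r : List String)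
    (s : PySem.Set String) (e : String) (h : ¬ PySem.Set.contains s (pvNorm e) = true)
    (hd : D.contains (pvNorm e) = true) :
    pvBStep D (sl, r, s) e
      = (sl.set (D.getD (pvNorm e) 0).toNat (some e), r, PySem.Set.add s (pvNorm e)) := by
  simp only [pvBStep]; rw [if_neg h, if_pos hd]

lemma pvBStep_neg_out (D : PySem.Dict String Int) (sl : List (Option String)) (r : List String)
    (s : PySem.Set String) (e : String) (h : ¬ PySem.Set.contains s (pvNorm e) = true)
    (hd : ¬ D.contains (pvNorm e) = true) :
    pvBStep D (sl, r, s) e = (sl, r ++ [e], PySem.Set.add s (pvNorm e)) := by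
  simp only [pvBStep]; rw [if_neg h, if_neg hd]

lemma pvSet_add_append (u : List String) (e : String)
    (h : ¬ PySem.Set.contains (u.map pvNorm : PySem.Set String) (pvNorm e) = true) :
    PySem.Set.add (u.map pvNorm : PySem.Set String) (pvNorm e)
      = ((u ++ [e]).map pvNorm : PySem.Set String) := by
  simp only [PySem.Set.add]
  rw [if_neg (by simpa [PySem.Set.contains] using h)]
  simp

lemma pvAFold_nodup (eps : List String) (u : List String) (h : (u.map pvNorm).Nodup) :
    (((eps.foldl pvAStep (u, (u.map pvNorm : PySem.Set String))).1).map pvNorm).Nodup := by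
  induction eps generalizing u with
  | nil => simpa using h
  | cons e t ih =>
    rw [List.foldl_cons]
    by_cases hc : PySem.Set.contains (u.map pvNorm : PySem.Set String) (pvNorm e) = true
    · rw [pvAStep_pos _ _ _ hc]; exact ih u h
    · have hmem : pvNorm e ∉ u.map pvNorm := by
        simpa [PySem.Set.contains, List.contains_eq_mem] using hc
      have h2 : ((u ++ [e]).map pvNorm).Nodup := by
        simp only [List.map_append, List.map_cons, List.map_nil]
        exact List.nodup_append.mpr ⟨h, List.nodup_singleton _,
          by simpa [List.disjoint_singleton] using hmem⟩
      rw [pvAStep_neg _ _ _ hc, pvSet_add_append _ _ hc]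
      exact ih (u ++ [e]) h2

lemma pvFoldAB (D : PySem.Dict String Int) (eps : List String) (u : List String)
    (sl0 : List (Option String)) :
    eps.foldl (pvBStep D)
      (pvScatter D sl0 (u.filter (fun e => D.contains (pvNorm e))),
       u.filter (fun e => ! D.contains (pvNorm e)),
       (u.map pvNorm : PySem.Set String))
    = (pvScatter D sl0 ((eps.foldl pvAStep (u, (u.map pvNorm : PySem.Set String))).1.filter
          (fun e => D.contains (pvNorm e))),
       (eps.foldl pvAStep (u, (u.map pvNorm : PySem.Set String))).1.filter
          (fun e => ! D.contains (pvNorm e)),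
       ((eps.foldl pvAStep (u, (u.map pvNorm : PySem.Set String))).1.map pvNorm :
          PySem.Set String)) := by
  induction eps generalizing u with
  | nil => simp
  | cons e t ih =>
    rw [List.foldl_cons, List.foldl_cons]
    by_cases hc : PySem.Set.contains (u.map pvNorm : PySem.Set String) (pvNorm e) = true
    · rw [pvAStep_pos _ _ _ hc, pvBStep_pos _ _ _ _ _ hc]; exact ih u
    · rw [pvAStep_neg _ _ _ hc, pvSet_add_append _ _ hc]
      by_cases hd : D.contains (pvNorm e) = true
      · rw [pvBStep_neg_in _ _ _ _ _ hc hd, pvSet_add_append _ _ hc]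
        have hsl : (pvScatter D sl0 (u.filter (fun e => D.contains (pvNorm e)))).set
            (D.getD (pvNorm e) 0).toNat (some e)
            = pvScatter D sl0 ((u ++ [e]).filter (fun e => D.contains (pvNorm e))) := by
          simp [pvScatter, List.filter_append, hd, pvIdx]
        have hrem : u.filter (fun e => ! D.contains (pvNorm e))
            = (u ++ [e]).filter (fun e => ! D.contains (pvNorm e)) := by
          simp [List.filter_append, hd]
        rw [hsl, hrem]; exact ih (u ++ [e])
      · rw [pvBStep_neg_out _ _ _ _ _ hc hd, pvSet_add_append _ _ hc]
        have hsl : pvScatter D sl0 (u.filter (fun e => D.contains (pvNorm e)))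
            = pvScatter D sl0 ((u ++ [e]).filter (fun e => D.contains (pvNorm e))) := by
          simp [List.filter_append, hd]
        have hrem : u.filter (fun e => ! D.contains (pvNorm e)) ++ [e]
            = (u ++ [e]).filter (fun e => ! D.contains (pvNorm e)) := by
          simp [List.filter_append, hd]
        rw [hsl, hrem]; exact ih (u ++ [e])

lemma pvScatter_length (D : PySem.Dict String Int) (sl : List (Option String)) (P : List String) :
    (pvScatter D sl P).length = sl.length := by
  induction P generalizing sl with
  | nil => rfl
  | cons e t ih => simp only [pvScatter, List.foldl_cons] at ih ⊢; rw [ih, List.length_set]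

lemma pvScatter_append (D : PySem.Dict String Int) (sl : List (Option String)) (P : List String)
    (e : String) :
    pvScatter D sl (P ++ [e]) = (pvScatter D sl P).set (pvIdx D e).toNat (some e) := by
  simp [pvScatter, List.foldl_append]

lemma pvScatter_getElem? (D : PySem.Dict String Int) (P : List String) (sl : List (Option String))
    (h : ∀ e ∈ P, (pvIdx D e).toNat < sl.length) (j : Nat) :
    (pvScatter D sl P)[j]? =
      Option.or ((P.reverse.find? (fun e => (pvIdx D e).toNat == j)).map some) sl[j]? := by
  induction P using List.reverseRecOn with
  | nil => simp [pvScatter]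
  | append_singleton P e ih =>
    rw [pvScatter_append, List.getElem?_set]
    have hlen : (pvScatter D sl P).length = sl.length := pvScatter_length D sl P
    by_cases hj : (pvIdx D e).toNat = j
    · have hb : (pvIdx D e).toNat < (pvScatter D sl P).length := by
        rw [hlen]; exact h e (by simp)
      rw [if_pos hj, if_pos hb]
      simp [hj]
    · rw [if_neg hj]
      rw [ih (fun x hx => h x (by simp [hx]))]
      simp [hj]

lemma pvScatter_sorted (D : PySem.Dict String Int) (n : Nat) (P : List String)
    (hD : pvDictOK D n) (hn : (P.map pvNorm).Nodup)
    (hc : ∀ e ∈ P, D.contains (pvNorm e) = true) :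
    (pvScatter D (List.replicate n none) P).filterMap id
      = PySem.List.sorted P (fun e => D.getD (pvNorm e) 0) := by
  have hsome : ∀ e ∈ P, D.get? (pvNorm e) = some (pvIdx D e) := by
    intro e he
    have := hc e he
    rw [PySem.Dict.contains_eq_isSome_get?] at this
    obtain ⟨v, hv⟩ := Option.isSome_iff_exists.mp this
    rw [hv, pvIdx, PySem.Dict.getD_eq_get?_getD, hv]; rfl
  have hbound : ∀ e ∈ P, 0 ≤ pvIdx D e ∧ (pvIdx D e).toNat < n := by
    intro e he
    obtain ⟨h1, h2⟩ := hD.1 _ _ (hsome e he)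
    exact ⟨h1, h2⟩
  have hninj : ∀ e ∈ P, ∀ e' ∈ P, pvNorm e = pvNorm e' → e = e' := by
    intro e he e' he' hne
    exact List.inj_on_of_nodup_map hn he he' hne
  have hinj : ∀ e ∈ P, ∀ e' ∈ P, pvIdx D e = pvIdx D e' → e = e' := by
    intro e he e' he' hi
    exact hninj e he e' he' (hD.2 _ _ _ (hsome e he) (hi ▸ hsome e' he'))
  set g : Nat → Option String := fun j => P.reverse.find? (fun e => (pvIdx D e).toNat == j) with hg
  have hg1 : ∀ j e, g j = some e → e ∈ P ∧ (pvIdx D e).toNat = j := by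
    intro j e hge
    refine ⟨List.mem_reverse.mp (List.mem_of_find?_eq_some hge), ?_⟩
    have := List.find?_some hge
    simpa using this
  have hg2 : ∀ e ∈ P, g ((pvIdx D e).toNat) = some e := by
    intro e he
    have hs : (P.reverse.find? (fun e' => (pvIdx D e').toNat == (pvIdx D e).toNat)).isSome := by
      rw [List.find?_isSome]
      exact ⟨e, List.mem_reverse.mpr he, by simp⟩
    obtain ⟨e', he'⟩ := Option.isSome_iff_exists.mp hs
    obtain ⟨hmem, hje⟩ := hg1 _ _ he'
    have : pvIdx D e' = pvIdx D e := by
      obtain ⟨h1, -⟩ := hbound e he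
      obtain ⟨h1', -⟩ := hbound e' hmem
      omega
    show List.find? (fun x => (pvIdx D x).toNat == (pvIdx D e).toNat) P.reverse = some e
    rw [he', hinj e' hmem e he this]
  have hmap : pvScatter D (List.replicate n none) P = (List.range n).map g := by
    apply List.ext_getElem?
    intro j
    rw [pvScatter_getElem? D P _ (fun e he => by
      simpa using (hbound e he).2) j]
    by_cases hj : j < n
    · rw [List.getElem?_map, List.getElem?_range hj, List.getElem?_replicate, if_pos hj]
      simp only [hg]
      cases hge : List.find? (fun e => (pvIdx D e).toNat == j) P.reverse with
      | none => simp [hge, Option.or]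
      | some e => simp [hge, Option.or]
    · have hgn : g j = none := by
        cases hge : g j with
        | none => rfl
        | some e =>
          obtain ⟨he, hje⟩ := hg1 _ _ hge
          exact absurd ((hbound e he).2) (by omega)
      rw [List.getElem?_map]
      rw [List.getElem?_eq_none (by simpa using hj), List.getElem?_eq_none (by simpa using hj)]
      simp only [hg] at hgn
      simp [hgn, Option.or]
  have hpw : List.Pairwise (fun j j' => ∀ b, g j = some b → ∀ b', g j' = some b' →
      pvIdx D b < pvIdx D b') (List.range n) := by
    refine List.pairwise_lt_range.imp_of_mem ?_
    intro j j' hj hj' hlt b hb b' hb'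
    obtain ⟨hbm, hbj⟩ := hg1 _ _ hb
    obtain ⟨hbm', hbj'⟩ := hg1 _ _ hb'
    obtain ⟨h1, -⟩ := hbound b hbm
    obtain ⟨h1', -⟩ := hbound b' hbm'
    omega
  have hpair : ((List.range n).filterMap g).Pairwise (fun a b => pvIdx D a < pvIdx D b) :=
    List.pairwise_filterMap.mpr hpw
  have hnodup_ys : ((List.range n).filterMap g).Nodup :=
    hpair.imp (fun h => by intro heq; subst heq; exact absurd h (lt_irrefl _))
  have hmem_ys : ∀ x, x ∈ (List.range n).filterMap g ↔ x ∈ P := by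
    intro x
    rw [List.mem_filterMap]
    constructor
    · rintro ⟨j, -, hj⟩; exact (hg1 _ _ hj).1
    · intro hx
      exact ⟨(pvIdx D x).toNat, List.mem_range.mpr (hbound x hx).2, hg2 x hx⟩
  have hperm : ((List.range n).filterMap g).Perm P := by
    apply List.perm_of_nodup_nodup_toFinset_eq hnodup_ys (hn.of_map)
    ext x
    simp only [List.mem_toFinset]
    exact hmem_ys x
  rw [hmap, List.filterMap_map]
  have := PySem.List.sorted_eq_of_perm_of_pairwise_lt P ((List.range n).filterMap g)
    (fun e => D.getD (pvNorm e) 0) hperm (by simpa [pvIdx] using hpair)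
  rw [show id ∘ g = g from rfl]
  exact this.symm

def pvDict (pref : List String) : PySem.Dict String Int :=
  (PySem.List.enumerate pref).foldl (fun d p => d.insert (pvNorm p.2) p.1) (PySem.Dict.mk [])

lemma pvMain (eps pref : List String) :
    (PySem.List.sorted ((eps.foldl pvAStep (([] : List String), PySem.Set.empty)).1.filter
        (fun e => (pvDict pref).contains (pvNorm e)))
        (fun e => (pvDict pref).getD (pvNorm e) 0))
      ++ (eps.foldl pvAStep (([] : List String), PySem.Set.empty)).1.filter
        (fun e => ! (pvDict pref).contains (pvNorm e))
    = ((eps.foldl (pvBStep (pvDict pref))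
          (List.replicate pref.length none, [], PySem.Set.empty)).1.filterMap id)
      ++ (eps.foldl (pvBStep (pvDict pref))
          (List.replicate pref.length none, [], PySem.Set.empty)).2.1 := by
  have hD : pvDictOK (pvDict pref) pref.length := pvDict_ok pref
  have hAB : eps.foldl (pvBStep (pvDict pref))
      (List.replicate pref.length none, [], PySem.Set.empty)
      = (pvScatter (pvDict pref) (List.replicate pref.length none)
          ((eps.foldl pvAStep (([] : List String), PySem.Set.empty)).1.filter
            (fun e => (pvDict pref).contains (pvNorm e))),
         (eps.foldl pvAStep (([] : List String), PySem.Set.empty)).1.filter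
            (fun e => ! (pvDict pref).contains (pvNorm e)),
         ((eps.foldl pvAStep (([] : List String), PySem.Set.empty)).1.map pvNorm :
            PySem.Set String)) :=
    pvFoldAB (pvDict pref) eps [] (List.replicate pref.length none)
  rw [hAB]
  have hnd : (((eps.foldl pvAStep (([] : List String), PySem.Set.empty)).1).map pvNorm).Nodup :=
    pvAFold_nodup eps [] (by simp)
  have hndP : ((((eps.foldl pvAStep (([] : List String), PySem.Set.empty)).1.filter
      (fun e => (pvDict pref).contains (pvNorm e))).map pvNorm)).Nodup :=
    hnd.sublist (List.filter_sublist.map pvNorm)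
  have hcP : ∀ e ∈ (eps.foldl pvAStep (([] : List String), PySem.Set.empty)).1.filter
      (fun e => (pvDict pref).contains (pvNorm e)), (pvDict pref).contains (pvNorm e) = true := by
    intro e he
    exact (List.mem_filter.mp he).2
  rw [pvScatter_sorted (pvDict pref) pref.length _ hD hndP hcP]


-- ===== VERDICT (by name: the statement is the Claim_ definition above) =====
theorem prioritize_endpoints_spec : Claim_equal_prioritize_endpoints := by
  intro eps pref _hdom
  show prioritize_endpoints eps pref = prioritize_endpoints_alt eps pref
  exact pvMain eps pref
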